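-- pv_equiv track=rewrite | github.com/arijitdutta197/sleepify | ref.py | my_score_col
-- ===== SOURCE A (Python) =====
-- def my_score_col(gpsqi):
--     l=[]
--     for sc in gpsqi:
--         if sc<=5:
--             l.append(1)
--         elif sc>5 and sc<=10:
--             l.append(2)
--         elif sc>10 and sc<=15:
--             l.append(3)
--         else:
--             l.append(4)
--     return l
-- ===== SOURCE B (Python) =====
-- def my_score_col(gpsqi):
--     # Binary search over a sorted threshold table instead of an if/elif cascade:
--     # bucket = (number of thresholds strictly below sc, found by bisection) + 1.
--     thresholds = [5, 10, 15]
--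
--     def bucket(sc):
--         lo, hi = 0, len(thresholds)
--         while lo < hi:
--             mid = (lo + hi) // 2
--             if thresholds[mid] < sc:
--                 lo = mid + 1
--             else:
--                 hi = mid
--         return lo + 1
--
--     return [bucket(sc) for sc in gpsqi]
-- ===== Notes on version B (the rewrite author's own statement) =====
-- stated objective: alternative
-- what changed: Replaces the linear if/elif threshold cascade with a hand-written bisect_left binary search over a sorted table of the three bucket boundaries; the bucket is the insertion index plus one.
import Mathlib
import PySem

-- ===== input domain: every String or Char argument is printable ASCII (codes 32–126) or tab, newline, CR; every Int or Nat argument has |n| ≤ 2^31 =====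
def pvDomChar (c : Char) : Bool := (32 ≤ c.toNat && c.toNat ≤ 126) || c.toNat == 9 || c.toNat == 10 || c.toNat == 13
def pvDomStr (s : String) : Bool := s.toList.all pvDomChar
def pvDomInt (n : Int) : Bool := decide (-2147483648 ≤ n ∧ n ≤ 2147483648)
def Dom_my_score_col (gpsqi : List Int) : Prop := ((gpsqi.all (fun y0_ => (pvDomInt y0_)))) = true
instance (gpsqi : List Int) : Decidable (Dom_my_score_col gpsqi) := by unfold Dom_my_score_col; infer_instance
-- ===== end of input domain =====

-- B replaces A's if/elif cascade with a bisect_left binary search over a sorted table of the three bucket boundaries; objective: alternative.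


-- ===== PORT A =====
def my_score_col (gpsqi : List Int) : List Int :=
  gpsqi.foldl (fun l sc =>
    l ++ [if sc ≤ 5 then (1 : Int)
          else if sc > 5 ∧ sc ≤ 10 then 2
          else if sc > 10 ∧ sc ≤ 15 then 3
          else 4]) []

-- ===== PORT B =====
-- hand-written bisect_left loop from Source B (while lo < hi: mid=(lo+hi)//2; …),
-- with fuel = hi - lo bounding the loop (each step strictly shrinks the interval)
def pvBisect : Nat → List Int → Int → Nat → Nat → Nat
  | 0, _, _, lo, _ => lo
  | fuel + 1, t, sc, lo, hi =>
    if lo < hi then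
      let mid := (lo + hi) / 2
      if t.getD mid 0 < sc then pvBisect fuel t sc (mid + 1) hi
      else pvBisect fuel t sc lo mid
    else lo

def my_score_col_alt (gpsqi : List Int) : List Int :=
  gpsqi.map (fun sc => (pvBisect 3 [5, 10, 15] sc 0 3 : Int) + 1)

-- ===== PRECONDITION & SPEC =====
def Spec_my_score_col (gpsqi : List Int) (out : List Int) : Prop := out = my_score_col_alt gpsqi
instance (gpsqi : List Int) (out : List Int) : Decidable (Spec_my_score_col gpsqi out) := by unfold Spec_my_score_col; infer_instance

-- ===== CLAIM =====
def Claim_equal_my_score_col : Prop := ∀ (gpsqi : List Int), Dom_my_score_col gpsqi → Spec_my_score_col gpsqi (my_score_col gpsqi)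

-- ===== LEMMAS AND PROOFS =====
theorem my_score_col_elem (sc : Int) :
    (if sc ≤ 5 then (1 : Int)
     else if sc > 5 ∧ sc ≤ 10 then 2
     else if sc > 10 ∧ sc ≤ 15 then 3
     else 4)
    = (pvBisect 3 [5, 10, 15] sc 0 3 : Int) + 1 := by
  simp only [pvBisect]
  norm_num
  split_ifs <;> omega

-- ===== VERDICT =====
theorem my_score_col_spec : Claim_equal_my_score_col := by
  intro gpsqi _
  unfold Spec_my_score_col my_score_col my_score_col_alt
  rw [PySem.List.foldl_append_singleton_eq_map]
  simp only [List.nil_append]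
  exact List.map_congr_left (fun sc _ => my_score_col_elem sc)
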